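-- pv_equiv track=rewrite | github.com/colding10/cp-notebook | solutions/Real Contests/2022 USACO Dec/Problem_2_Feeding_the_Cows.py | minimum_patches
-- ===== SOURCE A (Python) =====
-- def minimum_patches(cows, k):
--     patches = ["."] * len(cows)
--     patch_count = 0
--     last_patch_h = -float("inf")
--     last_past_g = -float("inf")
--
--     for i in range(len(cows)):
--         if cows[i] == "G":
--             if last_past_g < i - k:
--                 patch_count += 1
--                 last_past_g = i
--                 patches[i] = "G"
--         else:
--             if last_patch_h < i - k:
--                 patch_count += 1
--                 last_patch_h = i
--                 patches[i] = "H"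
--
--     return patch_count, "".join(patches)
-- ===== SOURCE B (Python) =====
-- def minimum_patches(cows, k):
--     n = len(cows)
--
--     def pick(pos):
--         # jump greedy: mark a position, then skip forward past every position
--         # within k of the mark; no running watermark or per-index test.
--         marked = []
--         m = len(pos)
--         j = 0
--         while j < m:
--             first = pos[j]
--             marked.append(first)
--             j += 1
--             while j < m and pos[j] - first <= k:
--                 j += 1
--         return marked
--
--     gmarks = pick([i for i in range(n) if cows[i] == "G"])
--     hmarks = pick([i for i in range(n) if cows[i] != "G"])
--     patches = ["."] * n
--     for p in gmarks:
--         patches[p] = "G"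
--     for p in hmarks:
--         patches[p] = "H"
--     return len(gmarks) + len(hmarks), "".join(patches)
-- ===== Notes on version B (the rewrite author's own statement) =====
-- stated objective: alternative
-- what changed: Replaces A's single per-index pass with two -inf watermarks and in-loop counting by a per-class jump greedy that iterates over the marks (skipping every position within k of the current mark), then derives the count as the number of marks and renders the patch string from the mark lists afterwards.
import Mathlib
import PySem

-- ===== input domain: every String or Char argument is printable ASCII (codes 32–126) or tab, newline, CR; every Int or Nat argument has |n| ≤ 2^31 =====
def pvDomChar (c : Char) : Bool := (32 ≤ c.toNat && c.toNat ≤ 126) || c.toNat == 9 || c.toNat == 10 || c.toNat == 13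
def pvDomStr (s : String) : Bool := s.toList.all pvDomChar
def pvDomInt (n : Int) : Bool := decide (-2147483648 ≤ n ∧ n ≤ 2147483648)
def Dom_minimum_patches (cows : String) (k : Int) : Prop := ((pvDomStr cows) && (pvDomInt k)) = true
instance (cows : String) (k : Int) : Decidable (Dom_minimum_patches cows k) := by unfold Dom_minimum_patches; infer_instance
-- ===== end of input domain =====

-- B replaces A's single per-index pass with two watermarks by a jump greedy: per class it
-- iterates over the MARKS, skipping past every position within k of the last mark, then renders
-- the patch string from the mark lists; same O(n) cost (objective: alternative).

-- ===== PORT A =====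
-- "last < x" where last is -inf (none) or a previously stored index
def pvLt (last : Option Int) (x : Int) : Bool :=
  match last with
  | none => true
  | some v => v < x

-- state: (patch_count, last_past_g, last_patch_h, patches)
def pvStepA (cs : List Char) (k : Int) (st : Int × Option Int × Option Int × List Char)
    (i : Nat) : Int × Option Int × Option Int × List Char :=
  if cs.getD i '.' = 'G' then
    if pvLt st.2.1 ((i : Int) - k) then (st.1 + 1, some (i : Int), st.2.2.1, st.2.2.2.set i 'G')
    else st
  else
    if pvLt st.2.2.1 ((i : Int) - k) then (st.1 + 1, st.2.1, some (i : Int), st.2.2.2.set i 'H')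
    else st

def minimum_patches (cows : String) (k : Int) : Int × String :=
  let cs := cows.toList
  let st := (List.range cs.length).foldl (pvStepA cs k)
    (0, none, none, List.replicate cs.length '.')
  (st.1, String.mk st.2.2.2)

-- ===== PORT B =====
-- inner skip loop fused with the outer mark loop: skip every q within k of the current mark
-- `first`; the next surviving position becomes the next mark.
def pvPickAfter (k first : Int) : List Nat → List Nat
  | [] => []
  | q :: rest =>
      if (q : Int) - first ≤ k then pvPickAfter k first rest
      else q :: pvPickAfter k (q : Int) rest

-- outer loop entry: the first position is always marked
def pvPick (k : Int) : List Nat → List Nat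
  | [] => []
  | p :: rest => p :: pvPickAfter k (p : Int) rest

def minimum_patches_alt (cows : String) (k : Int) : Int × String :=
  let cs := cows.toList
  let n := cs.length
  let gmarks := pvPick k ((List.range n).filter (fun i => cs.getD i '.' = 'G'))
  let hmarks := pvPick k ((List.range n).filter (fun i => ¬ (cs.getD i '.' = 'G')))
  let patches := hmarks.foldl (fun ps p => ps.set p 'H')
    (gmarks.foldl (fun ps p => ps.set p 'G') (List.replicate n '.'))
  ((gmarks.length : Int) + (hmarks.length : Int), String.mk patches)

-- ===== PRECONDITION & SPEC =====
def Spec_minimum_patches (cows : String) (k : Int) (out : Int × String) : Prop := out = minimum_patches_alt cows k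
instance (cows : String) (k : Int) (out : Int × String) : Decidable (Spec_minimum_patches cows k out) := by unfold Spec_minimum_patches; infer_instance

-- ===== CLAIM (what is proved, stated in full; the proofs are below) =====
def Claim_equal_minimum_patches : Prop := ∀ (cows : String) (k : Int), Dom_minimum_patches cows k → Spec_minimum_patches cows k (minimum_patches cows k)

-- ===== LEMMAS AND PROOFS =====

-- proof-only intermediate: a single-class watermark scan, (patch_count, last, patches)
def pvStepS (ch : Char) (k : Int) (st : Int × Option Int × List Char) (i : Nat) :
    Int × Option Int × List Char :=
  if pvLt st.2.1 ((i : Int) - k) then (st.1 + 1, some (i : Int), st.2.2.set i ch) else st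

-- a scan's count is affine in the start count, and a set at a position the scan never
-- touches commutes out of the scan
theorem pvScan_shift_set (ch : Char) (k : Int) (js : List Nat) (cnt a : Int)
    (l : Option Int) (ps : List Char) (i : Nat) (c : Char) (h : i ∉ js) :
    js.foldl (pvStepS ch k) (cnt + a, l, ps.set i c) =
      ((js.foldl (pvStepS ch k) (cnt, l, ps)).1 + a,
       (js.foldl (pvStepS ch k) (cnt, l, ps)).2.1,
       (js.foldl (pvStepS ch k) (cnt, l, ps)).2.2.set i c) := by
  induction js generalizing cnt l ps with
  | nil => simp
  | cons j js ih =>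
    have hij : i ≠ j := by intro h'; exact h (by simp [h'])
    have hmem : i ∉ js := fun h' => h (List.mem_cons_of_mem _ h')
    simp only [List.foldl_cons, pvStepS]
    split_ifs with hc
    · rw [List.set_comm c ch hij, show cnt + a + 1 = cnt + 1 + a by ring]
      exact ih (cnt + 1) (some (j : Int)) (ps.set j ch) hmem
    · exact ih cnt l ps hmem

-- the interleaved pass decomposes into the G-scan followed by the H-scan
theorem pv_main (cs : List Char) (k : Int) (is : List Nat) (cnt : Int)
    (lg lh : Option Int) (ps : List Char) :
    is.foldl (pvStepA cs k) (cnt, lg, lh, ps) =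
      (let r1 := ((is.filter (fun i => cs.getD i '.' = 'G')).foldl (pvStepS 'G' k) (cnt, lg, ps));
       let r2 := ((is.filter (fun i => ¬ (cs.getD i '.' = 'G'))).foldl (pvStepS 'H' k) (r1.1, lh, r1.2.2));
       (r2.1, r1.2.1, r2.2.1, r2.2.2)) := by
  induction is generalizing cnt lg lh ps with
  | nil => simp
  | cons i is ih =>
    simp only [List.foldl_cons]
    by_cases hg : cs.getD i '.' = 'G'
    · rw [List.filter_cons_of_pos (by simpa using hg),
          List.filter_cons_of_neg (by simpa using hg)]
      by_cases hc : pvLt lg ((i : Int) - k) = true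
      · rw [show pvStepA cs k (cnt, lg, lh, ps) i
              = (cnt + 1, some (i : Int), lh, ps.set i 'G') by
              simp only [pvStepA]; rw [if_pos hg, if_pos hc]]
        simp only [List.foldl_cons]
        rw [show pvStepS 'G' k (cnt, lg, ps) i
              = (cnt + 1, some (i : Int), ps.set i 'G') by
              simp only [pvStepS]; rw [if_pos hc]]
        exact ih (cnt + 1) (some (i : Int)) lh (ps.set i 'G')
      · rw [show pvStepA cs k (cnt, lg, lh, ps) i = (cnt, lg, lh, ps) by
              simp only [pvStepA]; rw [if_pos hg, if_neg hc]]
        simp only [List.foldl_cons]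
        rw [show pvStepS 'G' k (cnt, lg, ps) i = (cnt, lg, ps) by
              simp only [pvStepS]; rw [if_neg hc]]
        exact ih cnt lg lh ps
    · have hnot : i ∉ is.filter (fun i => cs.getD i '.' = 'G') := by
        intro hmem
        exact hg (by simpa using (List.mem_filter.mp hmem).2)
      rw [List.filter_cons_of_neg (by simpa using hg),
          List.filter_cons_of_pos (by simpa using hg)]
      by_cases hc : pvLt lh ((i : Int) - k) = true
      · rw [show pvStepA cs k (cnt, lg, lh, ps) i
              = (cnt + 1, lg, some (i : Int), ps.set i 'H') by
              simp only [pvStepA]; rw [if_neg hg, if_pos hc]]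
        rw [ih (cnt + 1) lg (some (i : Int)) (ps.set i 'H')]
        dsimp only
        rw [pvScan_shift_set 'G' k _ cnt 1 lg ps i 'H' hnot]
        rw [List.foldl_cons]
        simp only [pvStepS]
        rw [if_pos hc]
      · rw [show pvStepA cs k (cnt, lg, lh, ps) i = (cnt, lg, lh, ps) by
              simp only [pvStepA]; rw [if_neg hg, if_neg hc]]
        rw [ih cnt lg lh ps]
        dsimp only
        rw [List.foldl_cons]
        simp only [pvStepS]
        rw [if_neg hc]

-- the watermark scan with watermark `some first` computes exactly the jump greedy:
-- count grows by the number of picks, patches get exactly the picks written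
theorem pv_scanAfter (ch : Char) (k : Int) (rest : List Nat) (first cnt : Int)
    (ps : List Char) :
    (rest.foldl (pvStepS ch k) (cnt, some first, ps)).1
        = cnt + (pvPickAfter k first rest).length ∧
    (rest.foldl (pvStepS ch k) (cnt, some first, ps)).2.2
        = (pvPickAfter k first rest).foldl (fun ps p => ps.set p ch) ps := by
  induction rest generalizing first cnt ps with
  | nil => simp [pvPickAfter]
  | cons q rest ih =>
    simp only [List.foldl_cons, pvStepS, pvPickAfter, pvLt]
    by_cases h : (q : Int) - first ≤ k
    · rw [if_neg (by simpa using (by omega : ¬ first < (q : Int) - k)), if_pos h]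
      exact ih first cnt ps
    · rw [if_pos (by simpa using (by omega : first < (q : Int) - k)), if_neg h]
      simp only [List.length_cons, List.foldl_cons]
      obtain ⟨h1, h2⟩ := ih (q : Int) (cnt + 1) (ps.set q ch)
      exact ⟨by omega, h2⟩

theorem pv_scan (ch : Char) (k : Int) (idxs : List Nat) (cnt : Int) (ps : List Char) :
    (idxs.foldl (pvStepS ch k) (cnt, none, ps)).1
        = cnt + (pvPick k idxs).length ∧
    (idxs.foldl (pvStepS ch k) (cnt, none, ps)).2.2
        = (pvPick k idxs).foldl (fun ps p => ps.set p ch) ps := by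
  cases idxs with
  | nil => simp [pvPick]
  | cons p rest =>
    simp only [List.foldl_cons, pvStepS, pvLt, if_pos, pvPick, List.length_cons,
      List.foldl_cons]
    obtain ⟨h1, h2⟩ := pv_scanAfter ch k rest (p : Int) (cnt + 1) (ps.set p ch)
    exact ⟨by omega, h2⟩

-- ===== VERDICT (by name: the statement is the Claim_ definition above) =====
theorem minimum_patches_spec : Claim_equal_minimum_patches := by
  intro cows k _
  unfold Spec_minimum_patches minimum_patches minimum_patches_alt
  dsimp only
  rw [pv_main]
  dsimp only
  obtain ⟨g1, g2⟩ := pv_scan 'G' k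
    ((List.range cows.toList.length).filter (fun i => cows.toList.getD i '.' = 'G'))
    0 (List.replicate cows.toList.length '.')
  obtain ⟨h1, h2⟩ := pv_scan 'H' k
    ((List.range cows.toList.length).filter (fun i => ¬ (cows.toList.getD i '.' = 'G')))
    _ _
  rw [h1, h2, g1, g2]
  rw [zero_add]
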